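-- pv_equiv track=rewrite | github.com/Ekiz/adventofcode2019 | secure_container.py | at_least_one_double
-- ===== SOURCE A (Python) =====
-- def get_number_as_list(number):
--     if number < 10:
--         return [number]
--     element = number%10
--     return get_number_as_list(int(number/10)) + [element]
--
-- def at_least_one_double(numbers):
--     ret = []
--     for number in numbers:
--         number_list = get_number_as_list(number)
--         number_unique = set(number_list)
--         if len(number_list)!=len(number_unique):
--            ret.append(number)
--     return ret
-- ===== SOURCE B (Python) =====
-- def get_number_as_list(number):
--     if number < 10:
--         return [number]
--     element = number%10
--     return get_number_as_list(int(number/10)) + [element]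
--
-- def _has_adjacent_dup(ds):
--     for i in range(len(ds) - 1):
--         if ds[i] == ds[i + 1]:
--             return True
--     return False
--
-- def at_least_one_double(numbers):
--     return [n for n in numbers if _has_adjacent_dup(sorted(get_number_as_list(n)))]
-- ===== Notes on version B (the rewrite author's own statement) =====
-- stated objective: alternative
-- what changed: Duplicate-digit detection via set-size comparison is replaced by sorting the digit list and scanning adjacent pairs, and the explicit accumulator loop becomes a list comprehension (filter).
import Mathlib
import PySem

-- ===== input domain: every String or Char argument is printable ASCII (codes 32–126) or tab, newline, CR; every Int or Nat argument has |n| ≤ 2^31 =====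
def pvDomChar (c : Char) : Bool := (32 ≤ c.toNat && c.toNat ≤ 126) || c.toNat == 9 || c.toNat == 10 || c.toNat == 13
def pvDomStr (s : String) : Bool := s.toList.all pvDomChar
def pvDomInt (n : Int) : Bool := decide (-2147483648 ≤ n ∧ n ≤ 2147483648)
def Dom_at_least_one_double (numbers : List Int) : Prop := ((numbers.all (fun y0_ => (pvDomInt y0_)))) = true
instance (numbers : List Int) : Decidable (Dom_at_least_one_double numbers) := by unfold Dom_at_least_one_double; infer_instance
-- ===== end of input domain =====

-- B replaces A's set-size duplicate test by sort + adjacent-pair scan and the accumulator loop by a filter (alternative decomposition, no speed claim).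

-- ===== PORT A =====
-- helper shared verbatim by both Python versions; int(number/10) = floor division here,
-- exact on the domain (|n| ≤ 2^31, and the recursive branch only sees number ≥ 10 > 0,
-- where float truncation agrees with floor division)
def get_number_as_list (number : Int) : List Int :=
  if number < 10 then [number]
  else get_number_as_list (PySem.Int.floordiv number 10) ++ [PySem.Int.mod number 10]
termination_by number.toNat
decreasing_by
  simp only [PySem.Int.floordiv]
  rw [Int.fdiv_eq_ediv_of_nonneg _ (by omega)]
  omega

def at_least_one_double (numbers : List Int) : List Int :=
  numbers.foldl (fun ret number =>
    let number_list := get_number_as_list number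
    let number_unique := PySem.Set.ofList number_list
    if number_list.length ≠ number_unique.length then ret ++ [number] else ret) []

-- ===== PORT B =====
-- any adjacent equal pair in a list ('for i in range(len(ds)-1): if ds[i]==ds[i+1]: return True')
def hasAdjacentDup : List Int → Bool
  | a :: b :: t => a == b || hasAdjacentDup (b :: t)
  | _ => false

def at_least_one_double_alt (numbers : List Int) : List Int :=
  numbers.filter (fun n =>
    hasAdjacentDup (PySem.List.sorted (get_number_as_list n) (fun x => x) false))

-- ===== PRECONDITION & SPEC =====
def Spec_at_least_one_double (numbers : List Int) (out : List Int) : Prop := out = at_least_one_double_alt numbers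
instance (numbers : List Int) (out : List Int) : Decidable (Spec_at_least_one_double numbers out) := by unfold Spec_at_least_one_double; infer_instance

-- ===== CLAIM (what is proved, stated in full; the proofs are below) =====
def Claim_equal_at_least_one_double : Prop := ∀ (numbers : List Int), Dom_at_least_one_double numbers → Spec_at_least_one_double numbers (at_least_one_double numbers)

-- ===== LEMMAS AND PROOFS =====

theorem ofList_sublist (l : List Int) : (PySem.Set.ofList l).Sublist l := by
  induction l with
  | nil => simp [PySem.Set.ofList_nil]
  | cons x xs ih =>
    rw [PySem.Set.ofList_cons]
    exact List.cons_sublist_cons.2 (((List.filter_sublist).trans ih))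

theorem len_ofList_iff (l : List Int) : (PySem.Set.ofList l).length = l.length ↔ l.Nodup := by
  constructor
  · intro h
    rw [← (ofList_sublist l).eq_of_length h]
    exact PySem.Set.nodup_ofList l
  · intro h
    rw [PySem.Set.ofList_eq_self_of_nodup _ h]

theorem hasAdjacentDup_false_iff (l : List Int) (hp : l.Pairwise (· ≤ ·)) :
    hasAdjacentDup l = false ↔ l.Nodup := by
  induction l with
  | nil => simp [hasAdjacentDup]
  | cons a t ih =>
    cases t with
    | nil => simp [hasAdjacentDup]
    | cons b t2 =>
      rw [List.pairwise_cons] at hp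
      obtain ⟨ha, hp2⟩ := hp
      have ih' := ih hp2
      constructor
      · intro h
        simp only [hasAdjacentDup, Bool.or_eq_false_iff, beq_eq_false_iff_ne, ne_eq] at h
        obtain ⟨hab, hrest⟩ := h
        have ht := ih'.1 hrest
        refine List.nodup_cons.2 ⟨?_, ht⟩
        intro hmem
        rcases List.mem_cons.1 hmem with h1 | h2
        · exact hab h1
        · have hb : b ≤ a := (List.pairwise_cons.1 hp2).1 a h2
          have hab' : a ≤ b := ha b (List.mem_cons_self ..)
          exact hab (le_antisymm hab' hb)
      · intro h
        have h2 := List.nodup_cons.1 h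
        simp only [hasAdjacentDup, Bool.or_eq_false_iff, beq_eq_false_iff_ne, ne_eq]
        exact ⟨fun he => h2.1 (he ▸ List.mem_cons_self ..), ih'.2 h2.2⟩

theorem cond_eq (n : Int) :
    decide ((get_number_as_list n).length ≠ (PySem.Set.ofList (get_number_as_list n)).length)
      = hasAdjacentDup (PySem.List.sorted (get_number_as_list n) (fun x => x) false) := by
  set l := get_number_as_list n with hl
  have hperm := PySem.List.sorted_perm l (fun x => x) false
  have hpw : (PySem.List.sorted l (fun x => x) false).Pairwise (· ≤ ·) :=
    PySem.List.sorted_pairwise l (fun x => x)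
  have hiff := hasAdjacentDup_false_iff _ hpw
  by_cases h : l.Nodup
  · have : (PySem.Set.ofList l).length = l.length := (len_ofList_iff l).2 h
    have hs : hasAdjacentDup (PySem.List.sorted l (fun x => x) false) = false :=
      hiff.2 (hperm.nodup_iff.2 h)
    simp [this, hs]
  · have hne : (PySem.Set.ofList l).length ≠ l.length := fun he => h ((len_ofList_iff l).1 he)
    have hs : hasAdjacentDup (PySem.List.sorted l (fun x => x) false) ≠ false :=
      fun he => h (hperm.nodup_iff.1 (hiff.1 he))
    simp [Ne.symm hne]
    exact Bool.ne_false_iff.mp hs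

-- ===== VERDICT (by name: the statement is the Claim_ definition above) =====
theorem at_least_one_double_spec : Claim_equal_at_least_one_double := by
  intro numbers _
  unfold Spec_at_least_one_double at_least_one_double at_least_one_double_alt
  rw [PySem.List.foldl_append_ite_eq_filter
    (fun number => (get_number_as_list number).length ≠ (PySem.Set.ofList (get_number_as_list number)).length)]
  rw [List.nil_append]
  exact List.filter_congr (fun x _ => cond_eq x)
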